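-- pv_equiv track=rewrite | github.com/InfinityZero3000/LexiLingo | ai-service/api/services/handlers/hubert_handler.py | _text_to_phonemes
-- ===== SOURCE A (Python) =====
-- from typing import Optional, Dict, Any, Union, List
--
-- def _text_to_phonemes(text: str) -> List[str]:
--     """Convert text to phonemes (simplified)."""
--     # This is a simplified version
--     # Real implementation should use a proper G2P library
--     phonemes = []
--     text = text.lower()
--
--     # Simple phoneme mapping
--     phoneme_map = {
--         "a": "æ", "e": "ɛ", "i": "ɪ", "o": "ɒ", "u": "ʌ",
--         "th": "θ", "sh": "ʃ", "ch": "tʃ", "ng": "ŋ",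
--     }
--
--     i = 0
--     while i < len(text):
--         # Check digraphs first
--         if i + 1 < len(text):
--             digraph = text[i:i+2]
--             if digraph in phoneme_map:
--                 phonemes.append(phoneme_map[digraph])
--                 i += 2
--                 continue
--
--         # Single character
--         char = text[i]
--         if char.isalpha():
--             phonemes.append(phoneme_map.get(char, char))
--         i += 1
--
--     return phonemes
-- ===== SOURCE B (Python) =====
-- # B: two-phase decomposition — tokenize (digraph-first) into a stream, then map/filter the tokens.
-- PHONEME_MAP = {
--     "a": "æ", "e": "ɛ", "i": "ɪ", "o": "ɒ", "u": "ʌ",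
--     "th": "θ", "sh": "ʃ", "ch": "tʃ", "ng": "ŋ",
-- }
-- DIGRAPHS = ("th", "sh", "ch", "ng")
--
--
-- def _tokens(s):
--     while s:
--         if s[:2] in DIGRAPHS:
--             yield s[:2]
--             s = s[2:]
--         else:
--             yield s[0]
--             s = s[1:]
--
--
-- def _text_to_phonemes(text):
--     """Convert text to phonemes (simplified)."""
--     return [PHONEME_MAP.get(t, t) for t in _tokens(text.lower())
--             if len(t) == 2 or t.isalpha()]
-- ===== Notes on version B (the rewrite author's own statement) =====
-- stated objective: alternative
-- what changed: A's single interleaved index-walking while-loop is split into two phases: a greedy digraph-first tokenizer producing the full token stream, then a comprehension that filters non-alpha single-char tokens and maps each token through the phoneme dict.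
import Mathlib
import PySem

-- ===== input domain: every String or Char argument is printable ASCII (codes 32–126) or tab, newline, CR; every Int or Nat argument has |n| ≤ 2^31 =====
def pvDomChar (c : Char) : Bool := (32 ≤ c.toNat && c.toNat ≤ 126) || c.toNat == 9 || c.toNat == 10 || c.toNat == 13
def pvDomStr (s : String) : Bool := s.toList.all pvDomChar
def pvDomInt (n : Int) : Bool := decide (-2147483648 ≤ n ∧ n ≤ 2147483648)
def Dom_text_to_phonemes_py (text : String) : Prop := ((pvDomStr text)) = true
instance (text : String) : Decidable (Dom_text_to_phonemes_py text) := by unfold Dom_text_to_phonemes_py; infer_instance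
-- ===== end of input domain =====

-- B re-decomposes A's interleaved index walk into two phases (tokenize, then map/filter); same cost, no behaviour change.

-- ===== PORT A =====
-- the phoneme_map dict (shared literal of both Pythons)
def pvPhonMap : PySem.Dict String String :=
  PySem.Dict.ofList [("a", "æ"), ("e", "ɛ"), ("i", "ɪ"), ("o", "ɒ"), ("u", "ʌ"),
                     ("th", "θ"), ("sh", "ʃ"), ("ch", "tʃ"), ("ng", "ŋ")]

-- A's while loop over the lowered text, index walk rendered as structural recursion on the char list
def pvLoopA : List Char → List String
  | [] => []
  | [c] =>      -- i + 1 < len fails: only the single-character branch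
      if PySem.Chars.isalpha c then
        [pvPhonMap.getD (String.ofList [c]) (String.ofList [c])]
      else []
  | c1 :: c2 :: rest =>
      match pvPhonMap.get? (String.ofList [c1, c2]) with   -- 'digraph in phoneme_map' + phoneme_map[digraph]
      | some p => p :: pvLoopA rest                        -- i += 2; continue
      | none =>
        if PySem.Chars.isalpha c1 then
          (pvPhonMap.getD (String.ofList [c1]) (String.ofList [c1])) :: pvLoopA (c2 :: rest)
        else pvLoopA (c2 :: rest)

def text_to_phonemes_py (text : String) : List String :=
  pvLoopA (PySem.Str.lower text).toList

-- ===== PORT B =====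
-- Source B's DIGRAPHS tuple
def pvDigraphs : List String := ["th", "sh", "ch", "ng"]

-- Source B's _tokens generator: greedy digraph-first tokenisation of the whole string
def pvTokensB : List Char → List String
  | [] => []
  | [c] => [String.ofList [c]]
  | c1 :: c2 :: rest =>
      if pvDigraphs.contains (String.ofList [c1, c2]) then
        String.ofList [c1, c2] :: pvTokensB rest
      else String.ofList [c1] :: pvTokensB (c2 :: rest)

-- Source B's list comprehension: filter (len == 2 or isalpha), then PHONEME_MAP.get(t, t)
def text_to_phonemes_py_alt (text : String) : List String :=
  ((pvTokensB (PySem.Str.lower text).toList).filter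
      (fun t => PySem.Str.len t == 2 || PySem.Str.strIsalpha t)).map
    (fun t => pvPhonMap.getD t t)

-- ===== PRECONDITION & SPEC =====
def Spec_text_to_phonemes_py (text : String) (out : List String) : Prop := out = text_to_phonemes_py_alt text
instance (text : String) (out : List String) : Decidable (Spec_text_to_phonemes_py text out) := by unfold Spec_text_to_phonemes_py; infer_instance

-- ===== CLAIM (what is proved, stated in full; the proofs are below) =====
def Claim_equal_text_to_phonemes_py : Prop := ∀ (text : String), Dom_text_to_phonemes_py text → Spec_text_to_phonemes_py text (text_to_phonemes_py text)

-- ===== LEMMAS AND PROOFS =====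

theorem pvOfList_eq_iff (l1 l2 : List Char) : String.ofList l1 = String.ofList l2 ↔ l1 = l2 := by
  constructor
  · intro h; have := congrArg String.toList h; simpa using this
  · intro h; rw [h]

theorem pvFilterHeadOne (c : Char) :
    (PySem.Str.len (String.ofList [c]) == 2 || PySem.Str.strIsalpha (String.ofList [c]))
      = PySem.Chars.isalpha c := by
  simp [PySem.Str.len, PySem.Str.strIsalpha, PySem.Chars.strIsalpha, PySem.Chars.len]

theorem pvFilterHeadTwo (c1 c2 : Char) :
    (PySem.Str.len (String.ofList [c1, c2]) == 2 || PySem.Str.strIsalpha (String.ofList [c1, c2]))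
      = true := by
  simp [PySem.Str.len]

theorem pvNeLit1 (a c1 c2 : Char) (h : String.ofList [c1, c2] = String.ofList [a]) : False := by
  have := congrArg String.toList h
  simp at this

theorem pvMain (cs : List Char) :
    pvLoopA cs =
      ((pvTokensB cs).filter (fun t => PySem.Str.len t == 2 || PySem.Str.strIsalpha t)).map
        (fun t => pvPhonMap.getD t t) := by
  induction cs using pvTokensB.induct with
  | case1 => rfl
  | case2 c =>
      simp only [pvLoopA, pvTokensB, List.filter, List.map]
      by_cases h : PySem.Chars.isalpha c = true <;>
        simp [h, PySem.Str.strIsalpha, PySem.Str.len, PySem.Chars.strIsalpha, PySem.Chars.len]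
  | case3 c1 c2 rest hdig ih =>
      -- digraph branch: membership in the 4-digraph list forces one of four literal cases
      have h2 : ('t' = c1 ∧ 'h' = c2) ∨ ('s' = c1 ∧ 'h' = c2) ∨ ('c' = c1 ∧ 'h' = c2)
          ∨ ('n' = c1 ∧ 'g' = c2) := by
        simp only [pvDigraphs, List.contains_eq_mem, List.mem_cons, List.not_mem_nil,
          or_false, decide_eq_true_eq, eq_comm (a := String.ofList [c1, c2]),
          pvOfList_eq_iff (l2 := [c1, c2])] at hdig
        simpa using hdig
      rcases h2 with ⟨rfl, rfl⟩ | ⟨rfl, rfl⟩ | ⟨rfl, rfl⟩ | ⟨rfl, rfl⟩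
      · simp only [pvLoopA, pvTokensB, hdig, if_true,
          show pvPhonMap.get? (String.ofList ['t', 'h']) = some "θ" from by decide]
        rw [List.filter_cons, pvFilterHeadTwo, if_pos rfl, List.map_cons, ih]
        exact congrArg₂ List.cons (by decide) rfl
      · simp only [pvLoopA, pvTokensB, hdig, if_true,
          show pvPhonMap.get? (String.ofList ['s', 'h']) = some "ʃ" from by decide]
        rw [List.filter_cons, pvFilterHeadTwo, if_pos rfl, List.map_cons, ih]
        exact congrArg₂ List.cons (by decide) rfl
      · simp only [pvLoopA, pvTokensB, hdig, if_true,
          show pvPhonMap.get? (String.ofList ['c', 'h']) = some "tʃ" from by decide]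
        rw [List.filter_cons, pvFilterHeadTwo, if_pos rfl, List.map_cons, ih]
        exact congrArg₂ List.cons (by decide) rfl
      · simp only [pvLoopA, pvTokensB, hdig, if_true,
          show pvPhonMap.get? (String.ofList ['n', 'g']) = some "ŋ" from by decide]
        rw [List.filter_cons, pvFilterHeadTwo, if_pos rfl, List.map_cons, ih]
        exact congrArg₂ List.cons (by decide) rfl
  | case4 c1 c2 rest hdig ih =>
      have hmem : ¬ (String.ofList [c1, c2] = "th" ∨ String.ofList [c1, c2] = "sh"
          ∨ String.ofList [c1, c2] = "ch" ∨ String.ofList [c1, c2] = "ng") := by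
        simpa [pvDigraphs, List.contains_eq_mem] using hdig
      have e1 : String.ofList [c1, c2] ≠ String.ofList ['t', 'h'] :=
        fun e => hmem (Or.inl (e.trans (by decide)))
      have e2 : String.ofList [c1, c2] ≠ String.ofList ['s', 'h'] :=
        fun e => hmem (Or.inr (Or.inl (e.trans (by decide))))
      have e3 : String.ofList [c1, c2] ≠ String.ofList ['c', 'h'] :=
        fun e => hmem (Or.inr (Or.inr (Or.inl (e.trans (by decide)))))
      have e4 : String.ofList [c1, c2] ≠ String.ofList ['n', 'g'] :=
        fun e => hmem (Or.inr (Or.inr (Or.inr (e.trans (by decide)))))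
      have hget : pvPhonMap.get? (String.ofList [c1, c2]) = none := by
        rw [PySem.Dict.get?_eq_none_iff_not_mem_keys,
          show pvPhonMap.keys = ["a", "e", "i", "o", "u", "th", "sh", "ch", "ng"] from by decide]
        simp only [List.mem_cons, List.not_mem_nil, or_false]
        rintro (h | h | h | h | h | h | h | h | h)
        · exact pvNeLit1 'a' c1 c2 (h.trans (by decide))
        · exact pvNeLit1 'e' c1 c2 (h.trans (by decide))
        · exact pvNeLit1 'i' c1 c2 (h.trans (by decide))
        · exact pvNeLit1 'o' c1 c2 (h.trans (by decide))
        · exact pvNeLit1 'u' c1 c2 (h.trans (by decide))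
        · exact e1 (h.trans (by decide))
        · exact e2 (h.trans (by decide))
        · exact e3 (h.trans (by decide))
        · exact e4 (h.trans (by decide))
      simp only [pvLoopA, pvTokensB, hdig, hget, Bool.false_eq_true, if_false]
      rw [List.filter_cons, pvFilterHeadOne]
      by_cases h : PySem.Chars.isalpha c1 = true <;> simp [h, ih]

-- ===== VERDICT (by name: the statement is the Claim_ definition above) =====
theorem text_to_phonemes_py_spec : Claim_equal_text_to_phonemes_py := by
  intro text _
  unfold Spec_text_to_phonemes_py text_to_phonemes_py text_to_phonemes_py_alt
  exact pvMain _
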